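-- pv_equiv track=rewrite | github.com/pouyafath/BenchmarkLLMAgent | src/utils/patch_utils.py | strip_git_metadata
-- ===== SOURCE A (Python) =====
-- def strip_git_metadata(patch: str) -> str:
--     """Extract only diff content starting from 'diff --git' lines,
--     removing commit metadata (From, Author, Date, Subject)."""
--     lines = patch.split("\n")
--     diff_lines = []
--     in_diff = False
--     for line in lines:
--         if line.startswith("diff --git"):
--             in_diff = True
--         if in_diff:
--             diff_lines.append(line)
--     return "\n".join(diff_lines)
-- ===== SOURCE B (Python) =====
-- def strip_git_metadata(patch: str) -> str:
--     """Extract only diff content starting from 'diff --git' lines,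
--     removing commit metadata (From, Author, Date, Subject)."""
--     lines = patch.split("\n")
--     for i, line in enumerate(lines):
--         if line.startswith("diff --git"):
--             return "\n".join(lines[i:])
--     return ""
-- ===== Notes on version B (the rewrite author's own statement) =====
-- stated objective: simpler
-- what changed: Replaces A's in_diff flag with per-line appends by locating the first 'diff --git' line and returning the joined tail slice directly (early return, no accumulator).
import Mathlib
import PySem

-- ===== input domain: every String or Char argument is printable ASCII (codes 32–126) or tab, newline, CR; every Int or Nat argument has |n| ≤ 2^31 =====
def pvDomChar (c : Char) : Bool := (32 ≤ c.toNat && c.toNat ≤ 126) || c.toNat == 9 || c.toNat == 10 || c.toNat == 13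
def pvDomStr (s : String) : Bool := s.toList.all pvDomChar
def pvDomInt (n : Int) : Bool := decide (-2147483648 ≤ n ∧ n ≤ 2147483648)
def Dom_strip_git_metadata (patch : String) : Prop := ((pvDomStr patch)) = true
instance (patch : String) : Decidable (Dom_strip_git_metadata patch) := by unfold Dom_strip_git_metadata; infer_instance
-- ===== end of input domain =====

-- B replaces A's in_diff flag + per-line accumulator with find-the-first-'diff --git'-line-then-join-the-tail; simpler, same cost.

-- ===== PORT A =====
-- loop body of A's for-loop (both 'if' statements, in order)
def stripStep (st : List String × Bool) (line : String) : List String × Bool :=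
  let in_diff := if PySem.Str.startswith line "diff --git" then true else st.2
  let diff_lines := if in_diff then st.1 ++ [line] else st.1
  (diff_lines, in_diff)

def strip_git_metadata (patch : String) : String :=
  let lines := (PySem.Str.split? patch "\n").getD []   -- sep "\n" ≠ "", so split? is always 'some'
  let st := lines.foldl stripStep ([], false)
  PySem.Str.join "\n" st.1

-- ===== PORT B =====
-- B's enumerate loop: first line starting with "diff --git" → join of the tail from there; else ""
def stripGitGo : List String → String
  | [] => ""
  | line :: rest =>
    if PySem.Str.startswith line "diff --git" then PySem.Str.join "\n" (line :: rest)
    else stripGitGo rest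

def strip_git_metadata_alt (patch : String) : String :=
  stripGitGo ((PySem.Str.split? patch "\n").getD [])

-- ===== PRECONDITION & SPEC =====
def Spec_strip_git_metadata (patch : String) (out : String) : Prop := out = strip_git_metadata_alt patch
instance (patch : String) (out : String) : Decidable (Spec_strip_git_metadata patch out) := by unfold Spec_strip_git_metadata; infer_instance

-- ===== CLAIM (what is proved, stated in full; the proofs are below) =====
def Claim_equal_strip_git_metadata : Prop := ∀ (patch : String), Dom_strip_git_metadata patch → Spec_strip_git_metadata patch (strip_git_metadata patch)

-- ===== LEMMAS AND PROOFS =====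

theorem stripStep_of_true (acc : List String) (l : String) :
    stripStep (acc, true) l = (acc ++ [l], true) := by
  unfold stripStep; split_ifs <;> rfl

theorem stripStep_of_match (acc : List String) (b : Bool) (l : String)
    (h : PySem.Str.startswith l "diff --git" = true) :
    stripStep (acc, b) l = (acc ++ [l], true) := by
  unfold stripStep; rw [if_pos h]; rfl

theorem stripStep_of_skip (acc : List String) (l : String)
    (h : ¬ PySem.Str.startswith l "diff --git" = true) :
    stripStep (acc, false) l = (acc, false) := by
  unfold stripStep; rw [if_neg h]; rfl

-- once in_diff is true, the fold appends every remaining line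
theorem foldl_stripStep_true (ls : List String) (acc : List String) :
    ls.foldl stripStep (acc, true) = (acc ++ ls, true) := by
  induction ls generalizing acc with
  | nil => simp
  | cons l ls ih =>
    rw [List.foldl_cons, stripStep_of_true, ih]
    simp

theorem foldl_stripStep_eq_go (ls : List String) :
    PySem.Str.join "\n" (ls.foldl stripStep ([], false)).1 = stripGitGo ls := by
  induction ls with
  | nil => rfl
  | cons l ls ih =>
    rw [List.foldl_cons, stripGitGo]
    by_cases h : PySem.Str.startswith l "diff --git" = true
    · rw [if_pos h, stripStep_of_match _ _ _ h, foldl_stripStep_true]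
      simp
    · rw [if_neg h, stripStep_of_skip _ _ h, ih]

-- ===== VERDICT (by name: the statement is the Claim_ definition above) =====
theorem strip_git_metadata_spec : Claim_equal_strip_git_metadata := by
  intro patch _
  unfold Spec_strip_git_metadata strip_git_metadata strip_git_metadata_alt
  exact foldl_stripStep_eq_go _
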